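-- pv_equiv track=rewrite | github.com/maorin/ros-rolling | src/scrcpy_ros/scrcpy_ros/auto_aim.py | generate_adb_commands
-- ===== SOURCE A (Python) =====
-- def generate_adb_commands(start_x, start_y, displacement_x, displacement_y, steps):
--     commands = []
--     step_x = displacement_x // steps
--     step_y = displacement_y // steps
--     current_x, current_y = start_x, start_y
--
--     for _ in range(steps):
--         next_x = current_x + step_x
--         next_y = current_y + step_y
--         commands.append((current_x, current_y, next_x, next_y, 200))
--         current_x, current_y = next_x, next_y
--
--     return commands
-- ===== SOURCE B (Python) =====
-- def generate_adb_commands(start_x, start_y, displacement_x, displacement_y, steps):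
--     step_x = displacement_x // steps
--     step_y = displacement_y // steps
--     return [(start_x + i * step_x,
--              start_y + i * step_y,
--              start_x + (i + 1) * step_x,
--              start_y + (i + 1) * step_y,
--              200)
--             for i in range(steps)]
-- ===== Notes on version B (the rewrite author's own statement) =====
-- stated objective: idiomatic
-- what changed: Replaces A's stateful loop that threads current_x/current_y and appends into an accumulator list with a single stateless list comprehension mapping each index i to its tuple in closed form (start + i*step).
import Mathlib
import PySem

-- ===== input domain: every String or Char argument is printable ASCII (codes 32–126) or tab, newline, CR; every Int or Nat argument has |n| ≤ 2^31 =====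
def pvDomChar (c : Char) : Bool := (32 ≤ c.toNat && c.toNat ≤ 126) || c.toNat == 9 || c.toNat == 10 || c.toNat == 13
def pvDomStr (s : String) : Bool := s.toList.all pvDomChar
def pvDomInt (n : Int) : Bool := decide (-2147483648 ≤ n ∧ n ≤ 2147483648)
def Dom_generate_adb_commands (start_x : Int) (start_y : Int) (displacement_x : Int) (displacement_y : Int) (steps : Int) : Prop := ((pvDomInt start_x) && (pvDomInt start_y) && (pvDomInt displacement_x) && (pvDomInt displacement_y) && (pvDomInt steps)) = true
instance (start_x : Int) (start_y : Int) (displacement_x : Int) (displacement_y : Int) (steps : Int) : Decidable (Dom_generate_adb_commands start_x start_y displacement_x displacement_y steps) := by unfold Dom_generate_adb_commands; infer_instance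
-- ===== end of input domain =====

-- B replaces A's stateful accumulator loop with a stateless comprehension (map) computing
-- each tuple in closed form from its index; same cost, same return value ('idiomatic').

-- ===== PORT A =====
-- A: step_x/step_y from floor division, then a loop carrying (commands, current_x, current_y).
def generate_adb_commands (start_x : Int) (start_y : Int) (displacement_x : Int) (displacement_y : Int) (steps : Int) : List (Int × Int × Int × Int × Int) :=
  let step_x := PySem.Int.floordiv displacement_x steps
  let step_y := PySem.Int.floordiv displacement_y steps
  let st := (PySem.List.pyRange 0 steps 1).foldl
    (fun (st : List (Int × Int × Int × Int × Int) × Int × Int) _ =>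
      let next_x := st.2.1 + step_x
      let next_y := st.2.2 + step_y
      (st.1 ++ [(st.2.1, st.2.2, next_x, next_y, 200)], next_x, next_y))
    ([], start_x, start_y)
  st.1

-- ===== PORT B =====
-- B: the list comprehension becomes a map over range(steps); no state between elements.
def generate_adb_commands_alt (start_x : Int) (start_y : Int) (displacement_x : Int) (displacement_y : Int) (steps : Int) : List (Int × Int × Int × Int × Int) :=
  let step_x := PySem.Int.floordiv displacement_x steps
  let step_y := PySem.Int.floordiv displacement_y steps
  (PySem.List.pyRange 0 steps 1).map
    (fun i => (start_x + i * step_x, start_y + i * step_y,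
               start_x + (i + 1) * step_x, start_y + (i + 1) * step_y, 200))

-- ===== PRECONDITION & SPEC =====
-- Pre_ excludes steps = 0, where Python A raises ZeroDivisionError on displacement_x // steps.
def Pre_generate_adb_commands (start_x : Int) (start_y : Int) (displacement_x : Int) (displacement_y : Int) (steps : Int) : Prop := steps ≠ 0
instance (start_x : Int) (start_y : Int) (displacement_x : Int) (displacement_y : Int) (steps : Int) : Decidable (Pre_generate_adb_commands start_x start_y displacement_x displacement_y steps) := by unfold Pre_generate_adb_commands; infer_instance
def pvWitness_generate_adb_commands : Int × Int × Int × Int × Int := (100, 200, 30, -45, 7)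
def Spec_generate_adb_commands (start_x : Int) (start_y : Int) (displacement_x : Int) (displacement_y : Int) (steps : Int) (out : List (Int × Int × Int × Int × Int)) : Prop := out = generate_adb_commands_alt start_x start_y displacement_x displacement_y steps
instance (start_x : Int) (start_y : Int) (displacement_x : Int) (displacement_y : Int) (steps : Int) (out : List (Int × Int × Int × Int × Int)) : Decidable (Spec_generate_adb_commands start_x start_y displacement_x displacement_y steps out) := by unfold Spec_generate_adb_commands; infer_instance

-- ===== CLAIM (what is proved, stated in full; the proofs are below) =====
def Claim_equal_generate_adb_commands : Prop := ∀ (start_x : Int) (start_y : Int) (displacement_x : Int) (displacement_y : Int) (steps : Int), Dom_generate_adb_commands start_x start_y displacement_x displacement_y steps → Pre_generate_adb_commands start_x start_y displacement_x displacement_y steps → Spec_generate_adb_commands start_x start_y displacement_x displacement_y steps (generate_adb_commands start_x start_y displacement_x displacement_y steps)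

-- ===== LEMMAS AND PROOFS =====

-- Invariant of A's loop over range(n): the accumulated list is the mapped closed form and the
-- carried point is start + n*step.
theorem pv_loop_eq (sx sy step_x step_y : Int) : ∀ (n : Nat),
    (PySem.List.pyRange 0 (n : Int) 1).foldl
      (fun (st : List (Int × Int × Int × Int × Int) × Int × Int) _ =>
        let next_x := st.2.1 + step_x
        let next_y := st.2.2 + step_y
        (st.1 ++ [(st.2.1, st.2.2, next_x, next_y, 200)], next_x, next_y))
      ([], sx, sy)
    = ((PySem.List.pyRange 0 (n : Int) 1).map
        (fun i => (sx + i * step_x, sy + i * step_y,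
                   sx + (i + 1) * step_x, sy + (i + 1) * step_y, 200)),
       sx + (n : Int) * step_x, sy + (n : Int) * step_y) := by
  intro n
  induction n with
  | zero =>
      simp [PySem.List.pyRange_one_eq_nil (by omega : (0:Int) ≤ 0)]
  | succ m ih =>
      have h : ((m : Int)) + 1 = ((m + 1 : Nat) : Int) := by push_cast; ring
      rw [← h, PySem.List.pyRange_one_succ_right (by positivity : (0:Int) ≤ (m : Int)),
        List.foldl_append, ih]
      simp
      constructor <;> ring

-- ===== VERDICT (by name: the statement is the Claim_ definition above) =====
theorem generate_adb_commands_spec : Claim_equal_generate_adb_commands := by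
  intro start_x start_y displacement_x displacement_y steps _ hpre
  unfold Spec_generate_adb_commands generate_adb_commands generate_adb_commands_alt
  by_cases hle : steps ≤ 0
  · simp [PySem.List.pyRange_one_eq_nil hle]
  · have hn : steps = ((steps.toNat : Nat) : Int) := by omega
    rw [hn]
    exact congrArg Prod.fst
      (pv_loop_eq start_x start_y
        (PySem.Int.floordiv displacement_x ((steps.toNat : Nat) : Int))
        (PySem.Int.floordiv displacement_y ((steps.toNat : Nat) : Int)) steps.toNat)
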